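-- pv_equiv track=rewrite | github.com/Simerse/Python-Tools | simerse/box_format.py | box_hull_min_extents
-- ===== SOURCE A (Python) =====
-- def box_hull_min_extents(box_data_packed):
--     max_x = max(box_data_packed[i + 2] + box_data_packed[i] for i in range(0, len(box_data_packed), 4))
--     max_y = max(box_data_packed[i + 3] + box_data_packed[i + 1] for i in range(0, len(box_data_packed), 4))
--     min_x, min_y = min(box_data_packed[0::4]), min(box_data_packed[1::4])
--     return [
--         min_x, min_y,
--         max_x - min_x, max_y - min_y
--     ]
-- ===== SOURCE B (Python) =====
-- def box_hull_min_extents(box_data_packed):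
--     bounds = None  # (min_x, min_y, max_x, max_y), grown in a single pass
--     it = iter(box_data_packed)
--     for x, y, w, h in zip(it, it, it, it):
--         if bounds is None:
--             bounds = (x, y, x + w, y + h)
--         else:
--             bounds = (min(bounds[0], x), min(bounds[1], y),
--                       max(bounds[2], x + w), max(bounds[3], y + h))
--     min_x, min_y, max_x, max_y = bounds
--     return [min_x, min_y, max_x - min_x, max_y - min_y]
-- ===== Notes on version B (the rewrite author's own statement) =====
-- stated objective: alternative
-- what changed: A makes four separate reductions (two generator maxes over range(0,len,4) and two mins over strided slices, each re-scanning the list); B chunks the list once with the zip(it,it,it,it) idiom and grows one (min_x,min_y,max_x,max_y) bounds tuple in a single pass, so no strided slices or repeated index arithmetic remain.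
-- outside the precondition, e.g. on box_hull_min_extents([]): A raises ValueError, B raises TypeError
import Mathlib
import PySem

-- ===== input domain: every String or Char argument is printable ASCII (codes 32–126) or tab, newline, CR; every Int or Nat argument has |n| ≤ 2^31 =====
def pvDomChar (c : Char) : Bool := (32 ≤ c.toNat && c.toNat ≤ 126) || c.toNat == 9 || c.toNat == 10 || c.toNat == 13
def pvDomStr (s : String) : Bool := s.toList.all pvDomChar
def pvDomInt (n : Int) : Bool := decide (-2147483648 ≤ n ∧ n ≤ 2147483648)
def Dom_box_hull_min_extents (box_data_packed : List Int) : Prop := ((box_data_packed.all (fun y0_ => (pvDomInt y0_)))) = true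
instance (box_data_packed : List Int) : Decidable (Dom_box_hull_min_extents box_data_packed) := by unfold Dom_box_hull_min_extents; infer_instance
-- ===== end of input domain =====

-- B replaces A's four separate strided reductions by one single pass over 4-chunks (objective: alternative).

-- ===== PORT A =====
def box_hull_min_extents (box_data_packed : List Int) : List Int :=
  -- max(box_data_packed[i+2] + box_data_packed[i] for i in range(0, len, 4)); the .getD encode
  -- the ValueError of max()/min() on empty input and the IndexError at i+2/i+3, excluded by Pre_
  let max_x := ((PySem.List.max? ((PySem.List.pyRange 0 (box_data_packed.length : Int) 4).map
      (fun i => PySem.List.pyGetD box_data_packed (i + 2) 0 + PySem.List.pyGetD box_data_packed i 0))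
      (fun y => y)).getD 0)
  let max_y := ((PySem.List.max? ((PySem.List.pyRange 0 (box_data_packed.length : Int) 4).map
      (fun i => PySem.List.pyGetD box_data_packed (i + 3) 0 + PySem.List.pyGetD box_data_packed (i + 1) 0))
      (fun y => y)).getD 0)
  -- min(box_data_packed[0::4]), min(box_data_packed[1::4])
  let min_x := ((PySem.List.min? ((PySem.List.slice? box_data_packed (some 0) none 4).getD [])
      (fun y => y)).getD 0)
  let min_y := ((PySem.List.min? ((PySem.List.slice? box_data_packed (some 1) none 4).getD [])
      (fun y => y)).getD 0)
  [min_x, min_y, max_x - min_x, max_y - min_y]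

-- ===== PORT B =====
-- zip(it, it, it, it) over a list: consecutive 4-chunks, trailing leftovers dropped
def pyChunks4 : List Int → List (Int × Int × Int × Int)
  | x :: y :: w :: h :: rest => (x, y, w, h) :: pyChunks4 rest
  | _ => []

-- one loop iteration of B: grow the bounds tuple (min_x, min_y, max_x, max_y)
def bhmeStep (bd : Option (Int × Int × Int × Int)) (c : Int × Int × Int × Int) :
    Option (Int × Int × Int × Int) :=
  match bd, c with
  | none, (x, y, w, h) => some (x, y, x + w, y + h)
  | some (a, b, mx, my), (x, y, w, h) => some (min a x, min b y, max mx (x + w), max my (y + h))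

def box_hull_min_extents_alt (box_data_packed : List Int) : List Int :=
  match (pyChunks4 box_data_packed).foldl bhmeStep none with
  | some (a, b, mx, my) => [a, b, mx - a, my - b]
  | none => []  -- Python B raises TypeError here (empty input); outside Pre_

-- ===== PRECONDITION & SPEC =====
-- Pre_ excludes exactly the inputs on which A raises: [] (ValueError from max()/min() of an
-- empty sequence) and lengths not divisible by 4 (IndexError at i+2 or i+3).
def Pre_box_hull_min_extents (box_data_packed : List Int) : Prop :=
  box_data_packed ≠ [] ∧ box_data_packed.length % 4 = 0
instance (box_data_packed : List Int) : Decidable (Pre_box_hull_min_extents box_data_packed) := by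
  unfold Pre_box_hull_min_extents; infer_instance
def pvWitness_box_hull_min_extents : List Int := [2, 3, 4, 5, -1, 0, 2, 2]
def Spec_box_hull_min_extents (box_data_packed : List Int) (out : List Int) : Prop := out = box_hull_min_extents_alt box_data_packed
instance (box_data_packed : List Int) (out : List Int) : Decidable (Spec_box_hull_min_extents box_data_packed out) := by unfold Spec_box_hull_min_extents; infer_instance

-- ===== CLAIM (what is proved, stated in full; the proofs are below) =====
def Claim_equal_box_hull_min_extents : Prop := ∀ (box_data_packed : List Int), Dom_box_hull_min_extents box_data_packed → Pre_box_hull_min_extents box_data_packed → Spec_box_hull_min_extents box_data_packed (box_hull_min_extents box_data_packed)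

-- ===== LEMMAS AND PROOFS =====

-- proof-side names for A's four strided scans
def bhmeSlice (s : Int) (l : List Int) : List Int := (PySem.List.slice? l (some s) none 4).getD []
def bhmeMaxXs (l : List Int) : List Int :=
  (PySem.List.pyRange 0 (l.length : Int) 4).map
    (fun i => PySem.List.pyGetD l (i + 2) 0 + PySem.List.pyGetD l i 0)
def bhmeMaxYs (l : List Int) : List Int :=
  (PySem.List.pyRange 0 (l.length : Int) 4).map
    (fun i => PySem.List.pyGetD l (i + 3) 0 + PySem.List.pyGetD l (i + 1) 0)

theorem bhme_range_shift (n : Nat) :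
    PySem.List.pyRange 0 ((n : Int) + 4) 4 = 0 :: (PySem.List.pyRange 0 (n : Int) 4).map (· + 4) := by
  rw [PySem.List.pyRange_of_pos _ _ (by norm_num), PySem.List.pyRange_of_pos _ _ (by norm_num)]
  have h1 : (if (0:Int) < (n:Int) + 4 then (((n:Int) + 4 - 0 + 4 - 1) / 4).toNat else 0)
      = (if (0:Int) < (n:Int) then (((n:Int) - 0 + 4 - 1) / 4).toNat else 0) + 1 := by
    have e7 : ((n:Int) + 4 - 0 + 4 - 1) = ((n + 7 : Nat) : Int) := by push_cast; ring
    have e3 : ((n:Int) - 0 + 4 - 1) = ((n + 3 : Nat) : Int) := by push_cast; ring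
    rw [e7, e3, show ((4:Int)) = ((4:Nat):Int) from rfl, ← Int.natCast_div, ← Int.natCast_div]
    simp only [Int.toNat_natCast]
    split_ifs with h h2 <;> omega
  rw [h1, List.range_succ_eq_map]
  simp [List.map_map, Function.comp]
  intro a _; ring

-- reading past a whole 4-chunk is reading the tail
theorem bhme_getD_shift (x y w h d : Int) (r : List Int) (k : Nat) :
    ((x :: y :: w :: h :: r).getD (k + 4) d) = r.getD k d := by
  rw [List.getD_eq_getElem?_getD, List.getD_eq_getElem?_getD,
      show (x :: y :: w :: h :: r) = [x, y, w, h] ++ r from rfl,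
      List.getElem?_append_right (by simp)]
  simp

theorem bhme_maxXs_shift (x y w h : Int) (r : List Int) :
    bhmeMaxXs (x :: y :: w :: h :: r) = (w + x) :: bhmeMaxXs r := by
  unfold bhmeMaxXs
  have hl : ((x :: y :: w :: h :: r).length : Int) = (r.length : Int) + 4 := by simp; ring
  rw [hl, bhme_range_shift]
  simp only [List.map_cons, List.map_map]
  congr 1
  · simp [pysem]
  · apply List.map_congr_left
    intro i hi
    have h0 : 0 ≤ i := ((PySem.List.mem_pyRange_iff_of_pos (by norm_num) i).mp hi).1
    obtain ⟨k, rfl⟩ : ∃ k : Nat, i = (k : Int) := ⟨i.toNat, (Int.toNat_of_nonneg h0).symm⟩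
    simp only [Function.comp_apply]
    rw [show ((k : Int) + 4 + 2) = (((k + 2) + 4 : Nat) : Int) by push_cast; ring,
        show ((k : Int) + 4) = ((k + 4 : Nat) : Int) by push_cast; ring,
        PySem.List.pyGetD_natCast, PySem.List.pyGetD_natCast,
        bhme_getD_shift, bhme_getD_shift,
        show ((k : Int) + 2) = ((k + 2 : Nat) : Int) by push_cast; ring,
        PySem.List.pyGetD_natCast, PySem.List.pyGetD_natCast]

theorem bhme_maxYs_shift (x y w h : Int) (r : List Int) :
    bhmeMaxYs (x :: y :: w :: h :: r) = (h + y) :: bhmeMaxYs r := by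
  unfold bhmeMaxYs
  have hl : ((x :: y :: w :: h :: r).length : Int) = (r.length : Int) + 4 := by simp; ring
  rw [hl, bhme_range_shift]
  simp only [List.map_cons, List.map_map]
  congr 1
  · simp [pysem]
  · apply List.map_congr_left
    intro i hi
    have h0 : 0 ≤ i := ((PySem.List.mem_pyRange_iff_of_pos (by norm_num) i).mp hi).1
    obtain ⟨k, rfl⟩ : ∃ k : Nat, i = (k : Int) := ⟨i.toNat, (Int.toNat_of_nonneg h0).symm⟩
    simp only [Function.comp_apply]
    rw [show ((k : Int) + 4 + 3) = (((k + 3) + 4 : Nat) : Int) by push_cast; ring,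
        show ((k : Int) + 4 + 1) = (((k + 1) + 4 : Nat) : Int) by push_cast; ring,
        PySem.List.pyGetD_natCast, PySem.List.pyGetD_natCast,
        bhme_getD_shift, bhme_getD_shift,
        show ((k : Int) + 3) = ((k + 3 : Nat) : Int) by push_cast; ring,
        show ((k : Int) + 1) = ((k + 1 : Nat) : Int) by push_cast; ring,
        PySem.List.pyGetD_natCast, PySem.List.pyGetD_natCast]

-- closed form of l[s::4] for a natural start s
theorem bhme_slice_closed (s : Nat) (l : List Int) :
    (PySem.List.slice? l (some (s : Int)) none 4).getD [] =
      (List.range ((l.length - s + 3) / 4)).map (fun k => l.getD (s + 4 * k) 0) := by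
  simp only [PySem.List.slice?, PySem.List.sliceIndices]
  norm_num
  rw [if_neg (not_lt.mpr (Int.natCast_nonneg s)), ← Nat.cast_min]
  by_cases hs : s < l.length
  · rw [Nat.min_eq_left (le_of_lt hs), if_pos (by exact_mod_cast hs)]
    have hc : (((l.length : Int) - (s : Int) + 4 - 1) / 4).toNat = (l.length - s + 3) / 4 := by
      rw [show ((l.length : Int) - (s : Int) + 4 - 1) = ((l.length - s + 3 : Nat) : Int) by
            push_cast [Nat.cast_sub (le_of_lt hs)]; ring,
          show ((4 : Int)) = ((4 : Nat) : Int) from rfl, ← Int.natCast_div, Int.toNat_natCast]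
    rw [hc]
    have hmap : ∀ k ∈ List.range ((l.length - s + 3) / 4),
        l[((s : Int) + 4 * (k : Int)).toNat]? = some (l.getD (s + 4 * k) 0) := by
      intro k hk
      have hk' : k < (l.length - s + 3) / 4 := List.mem_range.mp hk
      have hin : s + 4 * k < l.length := by omega
      have ht : ((s : Int) + 4 * (k : Int)).toNat = s + 4 * k := by omega
      rw [ht, List.getElem?_eq_getElem hin, List.getD_eq_getElem _ _ hin]
    calc List.filterMap (fun k : Nat => l[((s : Int) + 4 * (k : Int)).toNat]?)
            (List.range ((l.length - s + 3) / 4))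
        = List.filterMap (fun k => some (l.getD (s + 4 * k) 0))
            (List.range ((l.length - s + 3) / 4)) := List.filterMap_congr hmap
      _ = (List.range ((l.length - s + 3) / 4)).map (fun k => l.getD (s + 4 * k) 0) :=
          List.filterMap_eq_map_iff_forall_eq_some.mpr (fun x => congrFun rfl)
  · rw [Nat.min_eq_right (le_of_not_gt hs), if_neg (lt_irrefl _)]
    have h0 : l.length - s = 0 := by omega
    rw [h0]
    norm_num

theorem bhme_slice0_shift (x y w h : Int) (r : List Int) :
    bhmeSlice 0 (x :: y :: w :: h :: r) = x :: bhmeSlice 0 r := by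
  unfold bhmeSlice
  rw [show ((0 : Int)) = ((0 : Nat) : Int) from rfl, bhme_slice_closed, bhme_slice_closed]
  have hc : ((x :: y :: w :: h :: r).length - 0 + 3) / 4 = ((r.length - 0 + 3) / 4) + 1 := by
    simp; omega
  rw [hc, List.range_succ_eq_map, List.map_cons, List.map_map]
  congr 1

theorem bhme_slice1_shift (x y w h : Int) (r : List Int) :
    bhmeSlice 1 (x :: y :: w :: h :: r) = y :: bhmeSlice 1 r := by
  unfold bhmeSlice
  rw [show ((1 : Int)) = ((1 : Nat) : Int) from rfl, bhme_slice_closed, bhme_slice_closed]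
  have hc : ((x :: y :: w :: h :: r).length - 1 + 3) / 4 = ((r.length - 1 + 3) / 4) + 1 := by
    simp; omega
  rw [hc, List.range_succ_eq_map, List.map_cons, List.map_map]
  congr 1

-- B's single-pass fold computes exactly A's four strided reductions
theorem bhme_combine (m : Nat) : ∀ (r : List Int), r.length = 4 * m → ∀ (a b mx my : Int),
    (pyChunks4 r).foldl bhmeStep (some (a, b, mx, my)) =
      some ((bhmeSlice 0 r).foldl min a, (bhmeSlice 1 r).foldl min b,
            (bhmeMaxXs r).foldl max mx, (bhmeMaxYs r).foldl max my) := by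
  induction m with
  | zero =>
    intro r hr a b mx my
    have hnil : r = [] := List.eq_nil_of_length_eq_zero (by omega)
    subst hnil
    rw [show bhmeSlice 0 [] = [] from by decide, show bhmeSlice 1 [] = [] from by decide,
        show bhmeMaxXs [] = [] from by decide, show bhmeMaxYs [] = [] from by decide]
    rfl
  | succ k ih =>
    intro r hr a b mx my
    rcases r with _ | ⟨x, _ | ⟨y, _ | ⟨w, _ | ⟨h, rest⟩⟩⟩⟩ <;> simp at hr <;> try omega
    have hlen : rest.length = 4 * k := by omega
    rw [bhme_slice0_shift, bhme_slice1_shift, bhme_maxXs_shift, bhme_maxYs_shift]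
    simp only [pyChunks4, List.foldl_cons, bhmeStep]
    rw [add_comm w x, add_comm h y]
    exact ih rest hlen _ _ _ _

-- ===== VERDICT (by name: the statement is the Claim_ definition above) =====
theorem box_hull_min_extents_spec : Claim_equal_box_hull_min_extents := by
  intro l _ hpre
  obtain ⟨hne, hmod⟩ := hpre
  rcases l with _ | ⟨x, _ | ⟨y, _ | ⟨w, _ | ⟨h, rest⟩⟩⟩⟩
  · exact absurd rfl hne
  · simp at hmod
  · simp at hmod
  · simp at hmod
  obtain ⟨m, hm⟩ : ∃ m, rest.length = 4 * m := ⟨rest.length / 4, by simp at hmod; omega⟩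
  unfold Spec_box_hull_min_extents box_hull_min_extents box_hull_min_extents_alt
  simp only [pyChunks4, List.foldl_cons, bhmeStep]
  rw [bhme_combine m rest hm]
  have e0 : (PySem.List.slice? (x :: y :: w :: h :: rest) (some 0) none 4).getD []
      = x :: bhmeSlice 0 rest := by
    have := bhme_slice0_shift x y w h rest
    unfold bhmeSlice at this
    exact this
  have e1 : (PySem.List.slice? (x :: y :: w :: h :: rest) (some 1) none 4).getD []
      = y :: bhmeSlice 1 rest := by
    have := bhme_slice1_shift x y w h rest
    unfold bhmeSlice at this
    exact this
  have e2 : ((PySem.List.pyRange 0 ((x :: y :: w :: h :: rest).length : Int) 4).map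
        (fun i => PySem.List.pyGetD (x :: y :: w :: h :: rest) (i + 2) 0
          + PySem.List.pyGetD (x :: y :: w :: h :: rest) i 0))
      = (w + x) :: bhmeMaxXs rest := by
    have := bhme_maxXs_shift x y w h rest
    unfold bhmeMaxXs at this
    exact this
  have e3 : ((PySem.List.pyRange 0 ((x :: y :: w :: h :: rest).length : Int) 4).map
        (fun i => PySem.List.pyGetD (x :: y :: w :: h :: rest) (i + 3) 0
          + PySem.List.pyGetD (x :: y :: w :: h :: rest) (i + 1) 0))
      = (h + y) :: bhmeMaxYs rest := by
    have := bhme_maxYs_shift x y w h rest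
    unfold bhmeMaxYs at this
    exact this
  rw [e0, e1, e2, e3, PySem.List.min?_id_cons, PySem.List.min?_id_cons,
      PySem.List.max?_id_cons, PySem.List.max?_id_cons]
  simp only [Option.getD_some, add_comm w x, add_comm h y]
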